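-- pv_equiv track=rewrite | github.com/gingami/pyworks | comparison.py | gen_U3
-- ===== SOURCE A (Python) =====
-- def gen_U3(K, P):
--     U3=set()
--     max=None
--     for s in K:
--         min=None
--         for fl in F(P, s):
--             length=len(fl)
--             if min is None or min > length:
--                 min=length
--         if max is None or max < min:
--             max=min
--     for s in K:
--         min=None
--         for fl in F(P, s):
--             length=len(fl)
--             if min is None or min > length:
--                 min=length
--         if min==max:
--             U3.add(s)
--     return U3
--
-- def F(P, s):
--     F=set()
--     for path in P:
--         if s in path:
--             F.add(path)
--     return F
-- ===== SOURCE B (Python) =====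
-- def gen_U3(K, P):
--     ks = list(dict.fromkeys(K))
--     mins = [None] * len(ks)
--     for p in P:
--         L = len(p)
--         mins = [L if (s in p and (v is None or L < v)) else v
--                 for s, v in zip(ks, mins)]
--     covered = [v for v in mins if v is not None]
--     m = max(covered) if covered else None
--     return {s for s, v in zip(ks, mins) if v == m}
-- ===== Notes on version B (the rewrite author's own statement) =====
-- stated objective: faster
-- what changed: B makes a single transposed pass over the paths maintaining a running minimum per distinct K-element (duplicates deduplicated up front), then one max and one collection pass, instead of A's two identical nested scans that each rebuild the set of containing paths for every K-element.
import Mathlib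
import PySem

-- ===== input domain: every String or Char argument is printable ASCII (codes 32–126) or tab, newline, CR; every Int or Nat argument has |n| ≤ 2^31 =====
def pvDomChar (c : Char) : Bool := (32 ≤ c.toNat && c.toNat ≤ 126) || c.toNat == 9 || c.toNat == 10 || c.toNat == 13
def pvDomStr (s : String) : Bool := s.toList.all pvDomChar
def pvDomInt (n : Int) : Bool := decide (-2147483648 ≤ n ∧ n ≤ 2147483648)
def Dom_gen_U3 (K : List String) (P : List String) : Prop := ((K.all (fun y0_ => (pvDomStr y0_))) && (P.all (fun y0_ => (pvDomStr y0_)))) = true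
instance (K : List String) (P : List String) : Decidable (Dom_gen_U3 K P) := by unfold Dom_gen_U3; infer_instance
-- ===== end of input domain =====

-- B replaces A's two identical nested scans (each rebuilding a set of containing paths per K-element)
-- by one transposed pass over the paths maintaining a per-distinct-element running minimum, then one max.
-- Equivalence is about the RETURN value (a set, order ignored in Python; the ports produce equal lists).

-- ===== PORT A =====
-- helper F(P, s): the set of paths containing s
def pvF (P : List String) (s : String) : PySem.Set String :=
  P.foldl (fun F path => if PySem.Str.isIn s path then PySem.Set.add F path else F) PySem.Set.empty

-- A's inner 'for fl in F(P, s)' min loop (min over lengths: order-independent, safe on a Set)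
def pvMinA (fls : List String) : Option Int :=
  fls.foldl (fun mn fl =>
    let length : Int := PySem.Str.len fl
    match mn with
    | none => some length
    | some m => if m > length then some length else some m) none

def gen_U3 (K : List String) (P : List String) : List String :=
  let max := K.foldl (fun max s =>
    let mn := pvMinA (pvF P s)
    match max, mn with
    | none, mn => mn
    | some a, some b => if a < b then some b else some a
    | some a, none => some a  -- Python raises TypeError here; these inputs are outside Pre_gen_U3
    ) none
  K.foldl (fun U3 s =>
    if pvMinA (pvF P s) = max then PySem.Set.add U3 s else U3) PySem.Set.empty

-- ===== PORT B =====
def gen_U3_alt (K : List String) (P : List String) : List String :=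
  let ks := PySem.List.dedup K                 -- list(dict.fromkeys(K))
  let mins : List (Option Int) := P.foldl (fun mins p =>
      let L : Int := PySem.Str.len p
      (ks.zip mins).map (fun sv =>
        if PySem.Str.isIn sv.1 p && (match sv.2 with | none => true | some v => decide (L < v))
        then some L else sv.2))
    (List.replicate ks.length none)            -- [None] * len(ks)
  let covered := mins.filterMap id             -- [v for v in mins if v is not None]
  let m : Option Int := match covered with
    | [] => none
    | _ => PySem.List.max? covered (fun x => x)
  (ks.zip mins).foldl (fun U sv => if sv.2 == m then PySem.Set.add U sv.1 else U) PySem.Set.empty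

-- ===== PRECONDITION & SPEC =====
def pvCov (P : List String) (s : String) : Bool := P.any (fun path => PySem.Str.isIn s path)

-- Pre_ excludes exactly the inputs where A raises TypeError ('max < min' with min = None): some
-- element of K contained in a path is followed by a later element of K contained in no path.
def Pre_gen_U3 (K : List String) (P : List String) : Prop :=
  List.Pairwise (fun a b => pvCov P a = true → pvCov P b = true) K
instance (K : List String) (P : List String) : Decidable (Pre_gen_U3 K P) := by unfold Pre_gen_U3; infer_instance

def pvWitness_gen_U3 : List String × List String := (["a", "b"], ["cab", "b"])

def Spec_gen_U3 (K : List String) (P : List String) (out : List String) : Prop := out = gen_U3_alt K P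
instance (K : List String) (P : List String) (out : List String) : Decidable (Spec_gen_U3 K P out) := by unfold Spec_gen_U3; infer_instance

-- ===== CLAIM (what is proved, stated in full; the proofs are below) =====
def Claim_equal_gen_U3 : Prop := ∀ (K : List String) (P : List String), Dom_gen_U3 K P → Pre_gen_U3 K P → Spec_gen_U3 K P (gen_U3 K P)
-- ===== LEMMAS AND PROOFS =====

-- the common one-step minimum update both programs perform
def pvBestStep (L : Int) (v : Option Int) : Option Int :=
  match v with
  | none => some L
  | some m => if L < m then some L else some m

-- B's per-element minimum, as a fold over P
def pvBBest (P : List String) (s : String) : Option Int :=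
  P.foldl (fun v p => if PySem.Str.isIn s p then pvBestStep (PySem.Str.len p) v else v) none

-- the min-fold both sides reduce to
def pvOMin (l : List Int) : Option Int := l.foldl (fun mn x => pvBestStep x mn) none

-- A's running-max step
def pvOMaxStep (mx mn : Option Int) : Option Int :=
  match mx, mn with
  | none, mn => mn
  | some a, some b => if a < b then some b else some a
  | some a, none => some a

theorem pvBestStep_some (L m : Int) : pvBestStep L (some m) = some (min m L) := by
  simp only [pvBestStep, min_def]
  split_ifs <;> simp <;> omega

theorem pvOMin_eq_min? (l : List Int) : pvOMin l = PySem.List.min? l (fun x => x) := by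
  cases l with
  | nil => simp [pvOMin, PySem.List.min?]
  | cons a t =>
    rw [PySem.List.min?_id_cons]
    show List.foldl (fun mn x => pvBestStep x mn) (some a) t = some (List.foldl min a t)
    induction t generalizing a with
    | nil => rfl
    | cons b t ih => simp only [List.foldl_cons, pvBestStep_some]; exact ih (min a b)

theorem pvMin?_congr (l₁ l₂ : List Int) (h : ∀ x, x ∈ l₁ ↔ x ∈ l₂) :
    PySem.List.min? l₁ (fun x => x) = PySem.List.min? l₂ (fun x => x) := by
  cases h₁ : PySem.List.min? l₁ (fun x => x) with
  | none =>
    rw [PySem.List.min?_eq_none_iff] at h₁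
    subst h₁
    rcases l₂ with _ | ⟨a, t⟩
    · rfl
    · exact absurd ((h a).2 (List.mem_cons_self)) (List.not_mem_nil)
  | some m =>
    cases h₂ : PySem.List.min? l₂ (fun x => x) with
    | none =>
      rw [PySem.List.min?_eq_none_iff] at h₂
      subst h₂
      exact absurd ((h m).1 (PySem.List.min?_mem h₁)) (List.not_mem_nil)
    | some m' =>
      have hm : m ∈ l₂ := (h m).1 (PySem.List.min?_mem h₁)
      have hm' : m' ∈ l₁ := (h m').2 (PySem.List.min?_mem h₂)
      have := PySem.List.min?_isMin h₁ m' hm'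
      have := PySem.List.min?_isMin h₂ m hm
      simp only [Option.some.injEq]
      omega

theorem pvMax?_congr (l₁ l₂ : List Int) (h : ∀ x, x ∈ l₁ ↔ x ∈ l₂) :
    PySem.List.max? l₁ (fun x => x) = PySem.List.max? l₂ (fun x => x) := by
  cases h₁ : PySem.List.max? l₁ (fun x => x) with
  | none =>
    rw [PySem.List.max?_eq_none_iff] at h₁
    subst h₁
    rcases l₂ with _ | ⟨a, t⟩
    · rfl
    · exact absurd ((h a).2 (List.mem_cons_self)) (List.not_mem_nil)
  | some m =>
    cases h₂ : PySem.List.max? l₂ (fun x => x) with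
    | none =>
      rw [PySem.List.max?_eq_none_iff] at h₂
      subst h₂
      exact absurd ((h m).1 (PySem.List.max?_mem h₁)) (List.not_mem_nil)
    | some m' =>
      have hm : m ∈ l₂ := (h m).1 (PySem.List.max?_mem h₁)
      have hm' : m' ∈ l₁ := (h m').2 (PySem.List.max?_mem h₂)
      have := PySem.List.max?_isMax h₁ m' hm'
      have := PySem.List.max?_isMax h₂ m hm
      simp only [Option.some.injEq]
      omega

-- A's inner min loop over F(P, s) equals B's per-element running minimum
theorem pvMinA_eq_pvBBest (P : List String) (s : String) :
    pvMinA (pvF P s) = pvBBest P s := by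
  have hF : pvF P s = PySem.Set.ofList (P.filter (fun p => PySem.Str.isIn s p)) := by
    rw [pvF, PySem.Set.ofList_eq_foldl, PySem.List.foldl_if_eq_foldl_filter]
    rfl
  have hA : ∀ l : List String, pvMinA l = pvOMin (l.map PySem.Str.len) := by
    intro l
    rw [pvMinA, pvOMin, List.foldl_map]
    apply PySem.List.foldl_congr_mem
    intro acc x _
    cases acc <;> rfl
  have hB : pvBBest P s = pvOMin ((P.filter (fun p => PySem.Str.isIn s p)).map PySem.Str.len) := by
    rw [pvBBest, PySem.List.foldl_if_eq_foldl_filter, pvOMin, List.foldl_map]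
  rw [hA, hB, pvOMin_eq_min?, pvOMin_eq_min?]
  apply pvMin?_congr
  intro x
  rw [hF, ← PySem.List.dedup_eq_ofList]
  simp only [List.mem_map, PySem.List.mem_dedup]

-- one step of B's comprehension, read off a (key, value) pair
theorem pvCompStep (g : String → Option Int) (p : String) :
    ((fun sv : String × Option Int =>
        if PySem.Str.isIn sv.1 p && (match sv.2 with | none => true | some v => decide (PySem.Str.len p < v))
        then some (PySem.Str.len p) else sv.2) ∘ (fun s => (s, g s)))
    = fun s => if PySem.Str.isIn s p then pvBestStep (PySem.Str.len p) (g s) else g s := by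
  funext s
  simp only [Function.comp]
  cases hin : PySem.Str.isIn s p with
  | false => simp
  | true =>
    cases hg : g s with
    | none => simp [pvBestStep]
    | some v =>
      by_cases hlt : PySem.Str.len p < v
      · simp [pvBestStep, hlt]
      · simp [pvBestStep, hlt]


-- zip of a list with a map of itself
theorem pvZipSelfMap {α β : Type} (l : List α) (g : α → β) :
    l.zip (l.map g) = l.map (fun s => (s, g s)) := by
  induction l with
  | nil => rfl
  | cons x l ih => simp [ih]

-- B's path loop maintains mins = ks.map (running per-element minimum)
theorem pvMinsInvariant (P ks : List String) :
    P.foldl (fun mins p =>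
      let L : Int := PySem.Str.len p
      (ks.zip mins).map (fun sv =>
        if PySem.Str.isIn sv.1 p && (match sv.2 with | none => true | some v => decide (L < v))
        then some L else sv.2))
      (List.replicate ks.length none)
    = ks.map (pvBBest P) := by
  have hrep : (List.replicate ks.length (none : Option Int)) = ks.map (fun _ => none) := by
    simp
  rw [hrep]
  have main : ∀ (Q : List String) (g : String → Option Int),
      Q.foldl (fun mins p =>
        let L : Int := PySem.Str.len p
        (ks.zip mins).map (fun sv =>
          if PySem.Str.isIn sv.1 p && (match sv.2 with | none => true | some v => decide (L < v))
          then some L else sv.2))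
        (ks.map g)
      = ks.map (fun s => Q.foldl (fun v p => if PySem.Str.isIn s p then pvBestStep (PySem.Str.len p) v else v) (g s)) := by
    intro Q
    induction Q with
    | nil => intro g; simp
    | cons p Q ih =>
      intro g
      simp only [List.foldl_cons]
      rw [pvZipSelfMap, List.map_map]
      rw [pvCompStep g p, ih]
  rw [main]
  rfl

-- A's running-max loop over a list of optional values equals max? of the present values
theorem pvOMaxFold_eq (l : List (Option Int)) :
    l.foldl pvOMaxStep none = PySem.List.max? (l.filterMap id) (fun x => x) := by
  have aux : ∀ (t : List (Option Int)) (a : Int),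
      t.foldl pvOMaxStep (some a) = some ((t.filterMap id).foldl max a) := by
    intro t
    induction t with
    | nil => intro a; rfl
    | cons b t ih =>
      intro a
      cases b with
      | none => simpa using ih a
      | some b =>
        have h1 : pvOMaxStep (some a) (some b) = some (max a b) := by
          simp only [pvOMaxStep, max_def]
          split_ifs <;> simp <;> omega
        have h2 : List.filterMap (id : Option Int → Option Int) (some b :: t) = b :: List.filterMap id t := by
          simp
        rw [List.foldl_cons, h1, ih, h2, List.foldl_cons]
  induction l with
  | nil => rfl
  | cons b t ih =>
    cases b with
    | none => simpa using ih
    | some b =>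
      have h2 : List.filterMap (id : Option Int → Option Int) (some b :: t) = b :: List.filterMap id t := by
        simp
      rw [List.foldl_cons, show pvOMaxStep none (some b) = some b from rfl, aux, h2,
        PySem.List.max?_id_cons]

-- adding an element with q x = true commutes with filtering by q
theorem pvAddFilter {α : Type} [BEq α] [LawfulBEq α] (q : α → Bool) (acc : List α) (x : α)
    (hq : q x = true) :
    PySem.Set.add (List.filter q acc) x = List.filter q (PySem.Set.add acc x) := by
  simp only [PySem.Set.add, PySem.Set.contains]
  have hmem : (List.filter q acc).contains x = acc.contains x := by
    simp [List.mem_filter, hq]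
  simp only [hmem]
  by_cases hc : x ∈ acc
  · simp [hc]
  · simp [hc, List.filter_append, hq]

-- adding an element with q x = false is invisible to a filter by q
theorem pvFilterAdd_false {α : Type} [BEq α] (q : α → Bool) (acc : List α) (x : α)
    (hq : q x = false) :
    List.filter q (PySem.Set.add acc x) = List.filter q acc := by
  simp only [PySem.Set.add]
  split
  · rfl
  · simp [List.filter_append, hq]

-- Set.ofList commutes with filter
theorem pvOfListFilter {α : Type} [BEq α] [LawfulBEq α] (q : α → Bool) (l : List α) :
    PySem.Set.ofList (l.filter q) = (PySem.Set.ofList l).filter q := by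
  rw [PySem.Set.ofList_eq_foldl, PySem.Set.ofList_eq_foldl]
  have main : ∀ (l acc : List α),
      List.foldl PySem.Set.add (acc.filter q) (l.filter q) = (List.foldl PySem.Set.add acc l).filter q := by
    intro l
    induction l with
    | nil => intro acc; rfl
    | cons x l ih =>
      intro acc
      simp only [List.filter_cons]
      cases hq : q x with
      | false =>
        rw [if_neg (by simp), List.foldl_cons, ← ih (PySem.Set.add acc x),
          pvFilterAdd_false q acc x hq]
      | true =>
        rw [if_pos rfl, List.foldl_cons, List.foldl_cons, ← ih (PySem.Set.add acc x),
          ← pvAddFilter q acc x hq]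
  simpa using main l []

-- B's 'max(covered) if covered else None' is just max? of covered
theorem pvMatchMax (l : List Int) :
    (match l with
      | [] => (none : Option Int)
      | _ => PySem.List.max? l (fun x => x)) = PySem.List.max? l (fun x => x) := by
  cases l <;> rfl

theorem gen_U3_spec : Claim_equal_gen_U3 := by
  intro K P _ _
  show gen_U3 K P = gen_U3_alt K P
  have hf : ∀ s, pvMinA (pvF P s) = pvBBest P s := pvMinA_eq_pvBBest P
  -- A's running max equals B's max over the deduplicated per-element minima
  have hmax : K.foldl (fun max s =>
        let mn := pvMinA (pvF P s)
        match max, mn with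
        | none, mn => mn
        | some a, some b => if a < b then some b else some a
        | some a, none => some a) none
      = PySem.List.max? (((PySem.List.dedup K).map (pvBBest P)).filterMap id) (fun x => x) := by
    have h1 : K.foldl (fun max s =>
          let mn := pvMinA (pvF P s)
          match max, mn with
          | none, mn => mn
          | some a, some b => if a < b then some b else some a
          | some a, none => some a) none
        = (K.map (fun s => pvMinA (pvF P s))).foldl pvOMaxStep none := by
      rw [List.foldl_map]
      rfl
    rw [h1, pvOMaxFold_eq]
    apply pvMax?_congr
    intro x
    simp only [List.mem_filterMap, List.mem_map, PySem.List.mem_dedup, id]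
    constructor
    · rintro ⟨o, ⟨s, hs, rfl⟩, ho⟩
      exact ⟨pvBBest P s, ⟨s, hs, rfl⟩, by rwa [hf] at ho⟩
    · rintro ⟨o, ⟨s, hs, rfl⟩, ho⟩
      exact ⟨pvMinA (pvF P s), ⟨s, hs, rfl⟩, by rwa [hf]⟩
  -- A's collection loop as an ofList-of-filter
  have hA2 : ∀ (m : Option Int),
      K.foldl (fun U3 s => if pvMinA (pvF P s) = m then PySem.Set.add U3 s else U3) PySem.Set.empty
      = PySem.Set.ofList (K.filter (fun s => pvBBest P s == m)) := by
    intro m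
    have hcg : ∀ (U : PySem.Set String) (s : String), s ∈ K →
        (if pvMinA (pvF P s) = m then PySem.Set.add U s else U)
        = (if (pvBBest P s == m) = true then PySem.Set.add U s else U) := by
      intro U s _
      rw [hf]
      by_cases h : pvBBest P s = m <;> simp [h]
    rw [PySem.List.foldl_congr_mem K _ _ PySem.Set.empty hcg,
      PySem.List.foldl_if_eq_foldl_filter (fun s => pvBBest P s == m) PySem.Set.add K PySem.Set.empty]
    rw [show (PySem.Set.empty : PySem.Set String) = ([] : List String) from rfl,
      ← PySem.Set.ofList_eq_foldl]
  -- B's collection loop as an ofList-of-filter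
  have hzip : ∀ (m : Option Int),
      ((PySem.List.dedup K).zip ((PySem.List.dedup K).map (pvBBest P))).foldl
        (fun U sv => if sv.2 == m then PySem.Set.add U sv.1 else U) PySem.Set.empty
      = PySem.Set.ofList ((PySem.List.dedup K).filter (fun s => pvBBest P s == m)) := by
    intro m
    rw [pvZipSelfMap, List.foldl_map,
      PySem.List.foldl_if_eq_foldl_filter (fun s => pvBBest P s == m) PySem.Set.add
        (PySem.List.dedup K) PySem.Set.empty]
    rw [show (PySem.Set.empty : PySem.Set String) = ([] : List String) from rfl,
      ← PySem.Set.ofList_eq_foldl]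
  -- ofList∘filter ignores duplicate keys
  have hsets : ∀ q : String → Bool,
      PySem.Set.ofList (K.filter q) = PySem.Set.ofList ((PySem.List.dedup K).filter q) := by
    intro q
    rw [pvOfListFilter, pvOfListFilter, PySem.List.dedup_eq_ofList,
      PySem.Set.ofList_eq_self_of_nodup _ (PySem.Set.nodup_ofList K)]
  simp only [gen_U3, gen_U3_alt]
  rw [pvMinsInvariant P (PySem.List.dedup K), hmax, pvMatchMax, hA2, hzip, hsets]
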